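-- pv_equiv track=rewrite | github.com/AAdorjan/HaziFeladat | hazifeladat2.py | feladat_1
-- ===== SOURCE A (Python) =====
-- def feladat_1(szam):
--     ossz=2
--     for i in range(2,szam-1):
--         if szam%i==0:
--             ossz=ossz+1
--     if ossz==4:
--         return True
--     else:
--         return False
-- ===== SOURCE B (Python) =====
-- def feladat_1(szam):
--     # True iff szam has exactly two divisors strictly between 1 and szam,
--     # i.e. exactly four divisors in total; counted in O(sqrt(n)) by pairing d with szam // d.
--     if szam < 4:
--         return False
--     cnt = 0
--     i = 1
--     while i * i <= szam:
--         if szam % i == 0: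
--             cnt += 1 if i * i == szam else 2
--         i += 1
--     return cnt == 4
-- ===== Notes on version B (the rewrite author's own statement) =====
-- stated objective: faster
-- what changed: Instead of scanning every i in range(2, szam-1), B counts all divisors only up to sqrt(szam), pairing each divisor d with szam//d, and returns True iff the total divisor count is 4 (equivalent to exactly two middle divisors).
import Mathlib
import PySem

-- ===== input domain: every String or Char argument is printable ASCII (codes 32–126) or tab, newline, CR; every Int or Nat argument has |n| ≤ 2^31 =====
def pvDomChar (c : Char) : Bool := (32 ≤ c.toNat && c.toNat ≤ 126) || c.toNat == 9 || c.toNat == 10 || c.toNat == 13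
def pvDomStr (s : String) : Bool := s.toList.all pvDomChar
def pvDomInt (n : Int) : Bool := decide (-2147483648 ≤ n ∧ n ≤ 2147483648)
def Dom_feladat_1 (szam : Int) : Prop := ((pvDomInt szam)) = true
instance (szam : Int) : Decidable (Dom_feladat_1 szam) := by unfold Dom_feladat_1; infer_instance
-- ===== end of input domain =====

-- B re-implements A's O(n) scan of range(2, szam-1) as an O(sqrt(n)) divisor count by pairing d with szam // d.

-- ===== PORT A =====
def feladat_1 (szam : Int) : Bool :=
  let ossz : Int :=
    (PySem.List.pyRange 2 (szam - 1) 1).foldl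
      (fun ossz i => if PySem.Int.mod szam i = 0 then ossz + 1 else ossz) 2
  if ossz = 4 then true else false

-- ===== PORT B =====
-- the 'while i * i <= szam' loop of Source B; state (cnt, i)
def feladat1Loop (szam : Int) (cnt : Int) (i : Int) : Int :=
  if h : i * i ≤ szam then
    feladat1Loop szam
      (if PySem.Int.mod szam i = 0 then (if i * i = szam then cnt + 1 else cnt + 2) else cnt)
      (i + 1)
  else cnt
termination_by (szam + 1 - i).toNat
decreasing_by
  have h1 : 2 * i ≤ szam + 1 := by nlinarith [sq_nonneg (i - 1)]
  have h2 : 0 ≤ szam := le_trans (mul_self_nonneg i) h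
  omega

def feladat_1_alt (szam : Int) : Bool :=
  if szam < 4 then false
  else decide (feladat1Loop szam 0 1 = 4)

-- ===== PRECONDITION & SPEC =====
def Spec_feladat_1 (szam : Int) (out : Bool) : Prop := out = feladat_1_alt szam
instance (szam : Int) (out : Bool) : Decidable (Spec_feladat_1 szam out) := by unfold Spec_feladat_1; infer_instance

-- ===== CLAIM (what is proved, stated in full; the proofs are below) =====
def Claim_equal_feladat_1 : Prop := ∀ (szam : Int), Dom_feladat_1 szam → Spec_feladat_1 szam (feladat_1 szam)

-- ===== LEMMAS AND PROOFS =====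

-- List.countP over List.range as a Finset card
theorem countP_range_eq_card_filter (n : ℕ) (p : ℕ → Bool) :
    (List.range n).countP p = ((Finset.range n).filter (fun k => p k)).card := by
  induction n with
  | zero => simp
  | succ m ih =>
    rw [List.range_succ, Finset.range_add_one]
    simp [List.countP_append, Finset.filter_insert, ih]
    split <;> simp [Finset.card_insert_of_notMem]

-- weight sum counted by B's loop from index j upward
def wSum (n j : ℕ) : ℤ :=
  ∑ d ∈ Finset.Ico j (n.sqrt + 1), (if d ∣ n then (if d * d = n then (1 : ℤ) else 2) else 0)

theorem loop_stop (n j : ℕ) (c : ℤ) (h : ¬ j * j ≤ n) :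
    feladat1Loop (n : ℤ) c (j : ℤ) = c ∧ wSum n j = 0 := by
  have hg : ¬ ((j : ℤ) * j ≤ (n : ℤ)) := by exact_mod_cast h
  have hj : n.sqrt < j := Nat.sqrt_lt'.mpr (by rw [pow_two]; exact not_le.mp h)
  constructor
  · rw [feladat1Loop, dif_neg hg]
  · rw [wSum, Finset.Ico_eq_empty (by omega), Finset.sum_empty]

theorem loop_sum (n : ℕ) : ∀ (fuel j : ℕ) (c : ℤ), n.sqrt + 1 - j ≤ fuel →
    feladat1Loop (n : ℤ) c (j : ℤ) = c + wSum n j := by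
  intro fuel
  induction fuel with
  | zero =>
    intro j c hf
    have hj : n.sqrt < j := by omega
    have hnj : n < j * j := by
      have h2 := Nat.sqrt_lt'.mp hj
      nlinarith
    obtain ⟨h1, h2⟩ := loop_stop n j c (by omega)
    rw [h1, h2, add_zero]
  | succ m ih =>
    intro j c hf
    by_cases hle : j * j ≤ n
    · have hg : ((j : ℤ) * j ≤ (n : ℤ)) := by exact_mod_cast hle
      have hjs : j ≤ n.sqrt := Nat.le_sqrt'.mpr (by nlinarith)
      rw [feladat1Loop, dif_pos hg]
      have hcast : ((j : ℤ) + 1) = ((j + 1 : ℕ) : ℤ) := by push_cast; ring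
      rw [hcast, ih (j + 1) _ (by omega)]
      have hsplit : wSum n j
          = (if j ∣ n then (if j * j = n then (1 : ℤ) else 2) else 0) + wSum n (j + 1) := by
        rw [wSum, wSum, Finset.sum_eq_sum_Ico_succ_bot (by omega : j < n.sqrt + 1)]
      rw [hsplit]
      have hd : (PySem.Int.mod (n : ℤ) (j : ℤ) = 0) ↔ j ∣ n := by
        rw [PySem.Int.mod_eq_zero_iff_dvd]; exact_mod_cast Iff.rfl
      have he : ((j : ℤ) * j = (n : ℤ)) ↔ j * j = n := by exact_mod_cast Iff.rfl
      by_cases hdv : j ∣ n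
      · rw [if_pos (hd.mpr hdv), if_pos hdv]
        by_cases hsq : j * j = n
        · rw [if_pos (he.mpr hsq), if_pos hsq]; ring
        · rw [if_neg (fun hh => hsq (he.mp hh)), if_neg hsq]; ring
      · rw [if_neg (fun hh => hdv (hd.mp hh)), if_neg hdv]; ring
    · obtain ⟨h1, h2⟩ := loop_stop n j c hle
      rw [h1, h2, add_zero]

-- the weighted sum over divisors below sqrt counts all divisors
theorem wSum_one (n : ℕ) (hn : 1 ≤ n) : wSum n 1 = (n.divisors.card : ℤ) := by
  rw [wSum, ← Finset.sum_filter]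
  have hfe : (Finset.Ico 1 (n.sqrt + 1)).filter (fun d => d ∣ n)
      = n.divisors.filter (fun d => d * d ≤ n) := by
    ext d
    simp only [Finset.mem_filter, Finset.mem_Ico, Nat.mem_divisors]
    constructor
    · rintro ⟨⟨h1, h2⟩, hd⟩
      refine ⟨⟨hd, by omega⟩, ?_⟩
      have h3 : d ^ 2 ≤ n := Nat.le_sqrt'.mp (by omega)
      nlinarith
    · rintro ⟨⟨hd, h0⟩, hsq⟩
      have hd1 : 1 ≤ d := Nat.pos_of_dvd_of_pos hd (by omega)
      have h2 : d ≤ n.sqrt := Nat.le_sqrt'.mpr (by nlinarith)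
      exact ⟨⟨hd1, by omega⟩, hd⟩
  rw [hfe]
  have hsum : ∑ d ∈ n.divisors.filter (fun d => d * d ≤ n), (if d * d = n then (1 : ℤ) else 2)
      = ((n.divisors.filter (fun d => d * d ≤ n)).card : ℤ)
        + ((n.divisors.filter (fun d => d * d < n)).card : ℤ) := by
    have hw : ∀ d ∈ n.divisors.filter (fun d => d * d ≤ n),
        (if d * d = n then (1 : ℤ) else 2) = 1 + (if d * d < n then (1 : ℤ) else 0) := by
      intro d hd
      rw [Finset.mem_filter] at hd
      by_cases h : d * d = n
      · rw [if_pos h, if_neg (by omega)]; ring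
      · rw [if_neg h, if_pos (by omega)]; ring
    rw [Finset.sum_congr rfl hw, Finset.sum_add_distrib]
    congr 1
    · simp
    · rw [← Finset.sum_filter, Finset.filter_filter]
      rw [Finset.sum_const]
      have : n.divisors.filter (fun d => d * d ≤ n ∧ d * d < n)
          = n.divisors.filter (fun d => d * d < n) :=
        Finset.filter_congr (fun d _ => by constructor <;> intro h <;> [exact h.2; exact ⟨by omega, h⟩])
      rw [this]
      simp
  rw [hsum]
  have hcard : (n.divisors.filter (fun d => d * d < n)).card
      = (n.divisors.filter (fun d => n < d * d)).card := by
    apply Finset.card_nbij' (fun d => n / d) (fun d => n / d)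
    · intro d hd
      simp only [Finset.mem_coe, Finset.mem_filter, Nat.mem_divisors] at hd ⊢
      obtain ⟨⟨hdvd, hn0⟩, hlt⟩ := hd
      have hd0 : 0 < d := Nat.pos_of_dvd_of_pos hdvd (by omega)
      have hq : d * (n / d) = n := Nat.mul_div_cancel' hdvd
      have hdq : d < n / d := by
        by_contra hge
        have h5 := Nat.mul_le_mul_left (k := d) (not_lt.mp hge)
        rw [hq] at h5
        omega
      refine ⟨⟨Nat.div_dvd_of_dvd hdvd, hn0⟩, ?_⟩
      calc n = d * (n / d) := hq.symm
        _ < (n / d) * (n / d) := by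
            apply Nat.mul_lt_mul_of_lt_of_le hdq (le_refl _)
            omega
    · intro d hd
      simp only [Finset.mem_coe, Finset.mem_filter, Nat.mem_divisors] at hd ⊢
      obtain ⟨⟨hdvd, hn0⟩, hlt⟩ := hd
      have hd0 : 0 < d := Nat.pos_of_dvd_of_pos hdvd (by omega)
      have hq : d * (n / d) = n := Nat.mul_div_cancel' hdvd
      have hq0 : 0 < n / d := Nat.div_pos (Nat.le_of_dvd (by omega) hdvd) hd0
      have hdq : n / d < d := by
        by_contra hge
        have h5 := Nat.mul_le_mul_left (k := d) (not_lt.mp hge)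
        rw [hq] at h5
        omega
      refine ⟨⟨Nat.div_dvd_of_dvd hdvd, hn0⟩, ?_⟩
      calc (n / d) * (n / d) < d * (n / d) := by
            apply Nat.mul_lt_mul_of_lt_of_le hdq (le_refl _)
            omega
        _ = n := hq
    · intro d hd
      simp only [Finset.mem_coe, Finset.mem_filter, Nat.mem_divisors] at hd
      exact Nat.div_div_self hd.1.1 hd.1.2
    · intro d hd
      simp only [Finset.mem_coe, Finset.mem_filter, Nat.mem_divisors] at hd
      exact Nat.div_div_self hd.1.1 hd.1.2
  have hpart : (n.divisors.filter (fun d => d * d ≤ n)).card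
      + (n.divisors.filter (fun d => n < d * d)).card = n.divisors.card := by
    have h6 := Finset.card_filter_add_card_filter_not
      (s := n.divisors) (p := fun d => d * d ≤ n)
    have h7 : n.divisors.filter (fun d => ¬ d * d ≤ n)
        = n.divisors.filter (fun d => n < d * d) :=
      Finset.filter_congr (fun d _ => by constructor <;> intro h <;> omega)
    rw [h7] at h6
    exact h6
  rw [hcard]
  push_cast [← hpart]
  ring

-- A's count over range(2, n-1) is the number of divisors minus 2
theorem card_middle (n : ℕ) (hn : 4 ≤ n) :
    ((Finset.range (n - 3)).filter (fun k => 2 + k ∣ n)).card = n.divisors.card - 2 := by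
  have hmem : ∀ d, d ∈ (n.divisors.erase n).erase 1 ↔ (d ∣ n ∧ 2 ≤ d ∧ d ≤ n - 2) := by
    intro d
    simp only [Finset.mem_erase, Nat.mem_divisors]
    constructor
    · rintro ⟨h1, hne, hdvd, -⟩
      have hd0 : d ≠ 0 := by rintro rfl; rw [Nat.zero_dvd] at hdvd; omega
      have hdn : d ≤ n := Nat.le_of_dvd (by omega) hdvd
      have hdn1 : d ≠ n - 1 := by
        rintro rfl
        have h2 : n - 1 ∣ n - (n - 1) := Nat.dvd_sub hdvd (dvd_refl _)
        have h3 : n - (n - 1) = 1 := by omega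
        rw [h3] at h2
        have := Nat.le_of_dvd (by omega) h2
        omega
      exact ⟨hdvd, by omega, by omega⟩
    · rintro ⟨hdvd, h2, h3⟩
      exact ⟨by omega, by omega, hdvd, by omega⟩
  have hstep : ((Finset.range (n - 3)).filter (fun k => 2 + k ∣ n)).card
      = ((n.divisors.erase n).erase 1).card := by
    apply Finset.card_nbij' (fun k => k + 2) (fun d => d - 2)
    · intro k hk
      simp only [Finset.mem_coe, Finset.mem_filter, Finset.mem_range] at hk
      simp only [Finset.mem_coe, hmem]
      exact ⟨by rw [show k + 2 = 2 + k by omega]; exact hk.2, by omega, by omega⟩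
    · intro d hd
      simp only [Finset.mem_coe, hmem] at hd
      simp only [Finset.mem_coe, Finset.mem_filter, Finset.mem_range]
      exact ⟨by omega, by rw [show 2 + (d - 2) = d by omega]; exact hd.1⟩
    · intro k _; show k + 2 - 2 = k; omega
    · intro d hd
      simp only [Finset.mem_coe, hmem] at hd
      show d - 2 + 2 = d
      omega
  rw [hstep,
    Finset.card_erase_of_mem (Finset.mem_erase.mpr ⟨by omega, Nat.one_mem_divisors.mpr (by omega)⟩),
    Finset.card_erase_of_mem (Nat.mem_divisors_self n (by omega))]
  omega

theorem two_le_card_divisors (n : ℕ) (hn : 4 ≤ n) : 2 ≤ n.divisors.card := by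
  have hsub : ({1, n} : Finset ℕ) ⊆ n.divisors := by
    intro d hd
    have hd' : d = 1 ∨ d = n := by simpa using hd
    rcases hd' with h | h
    · subst h; exact Nat.one_mem_divisors.mpr (by omega)
    · subst h; exact Nat.mem_divisors_self d (by omega)
  calc 2 = ({1, n} : Finset ℕ).card := by rw [Finset.card_pair (by omega)]
    _ ≤ n.divisors.card := Finset.card_le_card hsub

-- ===== VERDICT (by name: the statement is the Claim_ definition above) =====
theorem feladat_1_spec : Claim_equal_feladat_1 := by
  intro szam _
  unfold Spec_feladat_1
  by_cases hlt : szam < 4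
  · -- both sides are false
    have hr : PySem.List.pyRange 2 (szam - 1) 1 = [] :=
      PySem.List.pyRange_one_eq_nil (by omega)
    simp [feladat_1, feladat_1_alt, hr, hlt]
  · replace hlt : 4 ≤ szam := by omega
    set n : ℕ := szam.toNat with hn
    have hszam : szam = (n : ℤ) := by omega
    have hn4 : 4 ≤ n := by omega
    -- A side
    have hA : feladat_1 szam =
        decide (((Finset.range (n - 3)).filter (fun k => 2 + k ∣ n)).card = 2) := by
      rw [feladat_1]
      have hrange : PySem.List.pyRange 2 (szam - 1) 1
          = (List.range (n - 3)).map (fun k : ℕ => (2 : ℤ) + k) := by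
        rw [PySem.List.pyRange_one]
        congr 2
        omega
      simp only [hrange, PySem.List.foldl_ite_add_one, List.countP_map]
      have hcp : (List.countP ((fun i => decide (PySem.Int.mod szam i = 0)) ∘ fun k : ℕ => (2:ℤ) + k) (List.range (n - 3)))
          = (List.range (n - 3)).countP (fun k => decide (2 + k ∣ n)) := by
        apply List.countP_congr
        intro k _
        simp only [Function.comp_apply, decide_eq_true_eq]
        rw [PySem.Int.mod_eq_zero_iff_dvd, hszam]
        exact_mod_cast Iff.rfl
      rw [hcp, countP_range_eq_card_filter]
      simp only [decide_eq_true_eq]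
      by_cases hc : ((Finset.range (n - 3)).filter (fun k => 2 + k ∣ n)).card = 2
      · rw [if_pos (by omega), hc]
        simp
      · rw [if_neg (by omega)]
        simp [hc]
    -- B side
    have hB : feladat_1_alt szam = decide ((n.divisors.card : ℤ) = 4) := by
      have hl := loop_sum n (n.sqrt + 1) 1 0 (by omega)
      simp only [Nat.cast_one] at hl
      rw [feladat_1_alt, if_neg (by omega), hszam, hl, wSum_one n (by omega), zero_add]
    rw [hA, hB, card_middle n hn4]
    have h2 := two_le_card_divisors n hn4
    rw [decide_eq_decide]
    constructor
    · intro h; exact_mod_cast (by omega : n.divisors.card = 4)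
    · intro h; have : n.divisors.card = 4 := by exact_mod_cast h
      omega
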